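-- pv_equiv track=rewrite | github.com/DiscoveryPiscine42Bkk/discovery-piscine-introduction-to-python-Y0tsakrit | rush/ex01/checkmate.py | moveThePiece
-- ===== SOURCE A (Python) =====
-- def moveThePiece(board):
--
--     for i in range(len(board)):
--         for j in range(len(board[i])):
--             if board[i][j] == "P":
--                 if pawnMove(board,i,j):
--                     return True
--             elif board[i][j] == "B":
--                 if bishopMove(board,i,j):
--                     return True
--             elif board[i][j] == "R":
--                 if rookMove(board,i,j):
--                     return True
--             elif board[i][j] == "Q":
--                 if queenMove(board,i,j):
--                     return True
--     return False
--
-- def pawnMove(board,x,y):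
--     if x-1 >= 0 :
--         if y-1 >= 0 and board[x-1][y-1] == "K":
--             return True
--         if y+1 < len(board[x]) and board[x-1][y+1] == "K":
--             return True
--     return False
--
-- def bishopMove(board, x, y):
--     directions = [(-1, 1), (-1, -1), (1, 1), (1, -1)]
--
--     for x_delta, y_delta in directions:
--         current_x = x + x_delta
--         current_y = y + y_delta
--
--         while (0 <= current_x < len(board) and
--                0 <= current_y < len(board[current_x])):
--
--             piece = board[current_x][current_y]
--
--             if piece == "K":
--                 return True
--
--             if piece != "." and piece != " " and piece != "":
--                 break
--
--             current_x += x_delta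
--             current_y += y_delta
--
--     return False
--
-- def rookMove(board,x,y):
--     for i in range(len(board)):
--         if board[i][y] == "K":
--             return True
--         if i == x:
--             for j in range(len(board[i])):
--                 if board[i][j] == "K":
--                     return True
--     return False
--
-- def queenMove(board,x,y):
--     if not rookMove(board,x,y):
--         return False
--     if not bishopMove(board,x,y):
--         return False
--     return True
-- ===== SOURCE B (Python) =====
-- def moveThePiece(board):
--     kings = [(i, j) for i, row in enumerate(board) for j, c in enumerate(row) if c == "K"]
--     if not kings:
--         return False
--     king_set = set(kings)
--     king_rows = {i for i, _ in kings}
--     king_cols = {j for _, j in kings}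
--     for i, row in enumerate(board):
--         for j, c in enumerate(row):
--             if c == "P" and ((i - 1, j - 1) in king_set or (i - 1, j + 1) in king_set):
--                 return True
--             if c == "R" and (i in king_rows or j in king_cols):
--                 return True
--     for ki, kj in kings:
--         for dx, dy in ((-1, -1), (-1, 1), (1, -1), (1, 1)):
--             x, y = ki + dx, kj + dy
--             while 0 <= x < len(board) and 0 <= y < len(board[x]):
--                 c = board[x][y]
--                 if c == "B":
--                     return True
--                 if c == "Q" and (x in king_rows or y in king_cols):
--                     return True
--                 if c not in (".", " ", ""):
--                     break
--                 x += dx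
--                 y += dy
--     return False
-- ===== Notes on version B (the rewrite author's own statement) =====
-- stated objective: faster
-- what changed: Instead of dispatching per attacking piece with a helper per piece type, B collects all king coordinates and their row/column sets in one pass, answers pawn and rook threats by O(1) set lookups during a single board scan, and finds bishop/queen diagonal threats by walking outward from each king to the first non-empty square.
-- outside the precondition, e.g. on moveThePiece([['', 'K', 'K'], ['', 'P']]): A returns False, B returns True; on moveThePiece([['.', 'R'], ['K']]): A raises IndexError, B returns False
import Mathlib
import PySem

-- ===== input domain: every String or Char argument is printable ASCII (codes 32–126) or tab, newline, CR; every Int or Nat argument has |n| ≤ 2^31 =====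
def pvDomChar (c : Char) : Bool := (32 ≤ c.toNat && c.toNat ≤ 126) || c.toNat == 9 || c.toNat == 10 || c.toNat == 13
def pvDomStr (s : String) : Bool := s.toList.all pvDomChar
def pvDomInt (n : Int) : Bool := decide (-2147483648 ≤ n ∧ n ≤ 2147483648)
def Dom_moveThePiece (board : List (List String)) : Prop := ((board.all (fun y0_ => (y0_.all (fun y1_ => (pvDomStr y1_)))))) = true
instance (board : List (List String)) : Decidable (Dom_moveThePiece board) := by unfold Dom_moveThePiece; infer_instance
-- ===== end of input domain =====

-- B re-implements the threat detection king-centrically (king coordinate/row/column sets + walks outward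
-- from each king) instead of A's per-attacker dispatch; equivalence is proved on every board admitted by
-- Pre_ (rectangular, or ragged without pawn/rook/queen pieces).

-- ===== PORT A =====
-- board[i][j] / len(board[i]), totalised with defaults; inside Pre_ every access either is
-- guarded in the Python or in range, so the defaults are never observed.
def cellA (board : List (List String)) (i j : Int) : String :=
  (board.getD i.toNat []).getD j.toNat ""

def rowLenA (board : List (List String)) (i : Int) : Nat :=
  (board.getD i.toNat []).length

def pawnMoveA (board : List (List String)) (x y : Int) : Bool :=
  if 0 ≤ x - 1 then
    if 0 ≤ y - 1 ∧ cellA board (x-1) (y-1) = "K" then true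
    else if y + 1 < (rowLenA board x : Int) ∧ cellA board (x-1) (y+1) = "K" then true
    else false
  else false

-- the while-loop of bishopMove; fuel = board.length + 1 always suffices (each step moves the row index by ±1)
def walkA (board : List (List String)) : Nat → Int → Int → Int → Int → Bool
  | 0, _, _, _, _ => false
  | fuel+1, cx, cy, dx, dy =>
    if 0 ≤ cx ∧ cx < (board.length : Int) ∧ 0 ≤ cy ∧ cy < (rowLenA board cx : Int) then
      let piece := cellA board cx cy
      if piece = "K" then true
      else if piece ≠ "." ∧ piece ≠ " " ∧ piece ≠ "" then false
      else walkA board fuel (cx+dx) (cy+dy) dx dy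
    else false

def bishopMoveA (board : List (List String)) (x y : Int) : Bool :=
  ([((-1:Int),(1:Int)), (-1,-1), (1,1), (1,-1)]).any fun d =>
    walkA board (board.length + 1) (x + d.1) (y + d.2) d.1 d.2

def rookMoveA (board : List (List String)) (x y : Int) : Bool :=
  (List.range board.length).any fun i =>
    cellA board i y = "K"
    || (decide ((i : Int) = x) &&
        (List.range (rowLenA board i)).any fun j => cellA board i j = "K")

def queenMoveA (board : List (List String)) (x y : Int) : Bool :=
  if ¬ (rookMoveA board x y = true) then false
  else if ¬ (bishopMoveA board x y = true) then false
  else true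

def moveThePiece (board : List (List String)) : Bool :=
  (List.range board.length).any fun i =>
    (List.range (rowLenA board i)).any fun j =>
      let c := cellA board i j
      if c = "P" then pawnMoveA board i j
      else if c = "B" then bishopMoveA board i j
      else if c = "R" then rookMoveA board i j
      else if c = "Q" then queenMoveA board i j
      else false

-- ===== PORT B =====
-- kings = [(i, j) for i, row in enumerate(board) for j, c in enumerate(row) if c == "K"]
def kingsOf (board : List (List String)) : List (Int × Int) :=
  (PySem.List.enumerate board).flatMap fun p =>
    (PySem.List.enumerate p.2).filterMap fun q =>
      if q.2 = "K" then some (p.1, q.1) else none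

-- the while-loop of B's king-centric diagonal walk
def walkB (board : List (List String)) (krows kcols : PySem.Set Int) :
    Nat → Int → Int → Int → Int → Bool
  | 0, _, _, _, _ => false
  | fuel+1, x, y, dx, dy =>
    if 0 ≤ x ∧ x < (board.length : Int) ∧ 0 ≤ y ∧ y < (rowLenA board x : Int) then
      let c := cellA board x y
      if c = "B" then true
      else if c = "Q" ∧ (PySem.Set.contains krows x || PySem.Set.contains kcols y) = true then true
      else if c ≠ "." ∧ c ≠ " " ∧ c ≠ "" then false
      else walkB board krows kcols fuel (x+dx) (y+dy) dx dy
    else false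

-- the pawn/rook single scan of B (the first loop nest of Source B)
def scanPR (board : List (List String)) (kset : PySem.Set (Int × Int))
    (krows kcols : PySem.Set Int) : Bool :=
  (PySem.List.enumerate board).any fun p =>
    (PySem.List.enumerate p.2).any fun q =>
      (q.2 == "P" && (PySem.Set.contains kset (p.1 - 1, q.1 - 1)
                      || PySem.Set.contains kset (p.1 - 1, q.1 + 1)))
      || (q.2 == "R" && (PySem.Set.contains krows p.1 || PySem.Set.contains kcols q.1))

def moveThePiece_alt (board : List (List String)) : Bool :=
  let kings := kingsOf board
  if kings.isEmpty then false
  else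
    let krows : PySem.Set Int := PySem.Set.ofList (kings.map Prod.fst)
    let kcols : PySem.Set Int := PySem.Set.ofList (kings.map Prod.snd)
    if scanPR board (PySem.Set.ofList kings) krows kcols then true
    else kings.any fun k =>
      ([((-1:Int),(-1:Int)), (-1,1), (1,-1), (1,1)]).any fun d =>
        walkB board krows kcols (board.length + 1) (k.1 + d.1) (k.2 + d.2) d.1 d.2

-- ===== PRECONDITION & SPEC =====
def Rect (board : List (List String)) : Prop :=
  ∀ r ∈ board, ∀ r' ∈ board, r.length = r'.length

def NoPRQ (board : List (List String)) : Prop :=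
  ∀ r ∈ board, ∀ c ∈ r, c ≠ "P" ∧ c ≠ "R" ∧ c ≠ "Q"

-- Pre_ excludes exactly the ragged (non-rectangular) boards that carry a pawn/rook/queen: there A's
-- helpers index one row with another row's bounds, usually raising IndexError and otherwise returning
-- an accidental value; rectangular boards are the function's natural domain.
def Pre_moveThePiece (board : List (List String)) : Prop :=
  Rect board ∨ NoPRQ board
instance (board : List (List String)) : Decidable (Pre_moveThePiece board) := by
  unfold Pre_moveThePiece Rect NoPRQ; infer_instance

def pvWitness_moveThePiece : List (List String) := [[".", "K"], ["R", "."]]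

def Spec_moveThePiece (board : List (List String)) (out : Bool) : Prop := out = moveThePiece_alt board
instance (board : List (List String)) (out : Bool) : Decidable (Spec_moveThePiece board out) := by
  unfold Spec_moveThePiece; infer_instance

-- ===== CLAIM (what is proved, stated in full; the proofs are below) =====
def Claim_equal_moveThePiece : Prop :=
  ∀ (board : List (List String)), Dom_moveThePiece board → Pre_moveThePiece board →
    Spec_moveThePiece board (moveThePiece board)

-- ===== LEMMAS AND PROOFS =====

-- proof-side vocabulary
def Inb (board : List (List String)) (i j : Int) : Prop :=
  0 ≤ i ∧ i < (board.length : Int) ∧ 0 ≤ j ∧ j < (rowLenA board i : Int)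

def EmptyC (c : String) : Prop := c = "." ∨ c = " " ∨ c = ""

def IsK (board : List (List String)) (i j : Int) : Prop :=
  Inb board i j ∧ cellA board i j = "K"

def RCp (board : List (List String)) (x y : Int) : Prop :=
  (∃ k ∈ kingsOf board, k.1 = x) ∨ (∃ k ∈ kingsOf board, k.2 = y)

def GoodP (board : List (List String)) (x y : Int) : Prop :=
  cellA board x y = "B" ∨ (cellA board x y = "Q" ∧ RCp board x y)

def Seg (board : List (List String)) (p q d : Int × Int) (n : Nat) : Prop :=
  q.1 = p.1 + (n+1)*d.1 ∧ q.2 = p.2 + (n+1)*d.2 ∧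
  ∀ t : Nat, t < n → Inb board (p.1+(t+1)*d.1) (p.2+(t+1)*d.2) ∧
    EmptyC (cellA board (p.1+(t+1)*d.1) (p.2+(t+1)*d.2))

lemma cellA_nat (board : List (List String)) (i j : Nat) (hi : i < board.length) :
    cellA board (i : Int) (j : Int) = (board[i]).getD j "" := by
  simp [cellA, List.getD_eq_getElem?_getD, List.getElem?_eq_getElem hi]

lemma rowLenA_nat (board : List (List String)) (i : Nat) (hi : i < board.length) :
    rowLenA board (i : Int) = (board[i]).length := by
  simp [rowLenA, List.getD_eq_getElem?_getD, List.getElem?_eq_getElem hi]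

lemma kings_mem (board : List (List String)) (p : Int × Int) :
    p ∈ kingsOf board ↔ IsK board p.1 p.2 := by
  simp only [kingsOf, List.mem_flatMap, List.mem_filterMap, PySem.List.mem_enumerate_iff, zero_add]
  constructor
  · rintro ⟨q, ⟨i, hi, rfl⟩, r, ⟨j, hj, rfl⟩, hpr⟩
    by_cases hK : (board[i])[j] = "K"
    · simp only [hK, if_pos, Option.some_inj] at hpr
      subst hpr
      dsimp only
      refine ⟨⟨by positivity, by exact_mod_cast hi, by positivity, ?_⟩, ?_⟩
      · rw [rowLenA_nat board i hi]; exact_mod_cast hj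
      · rw [cellA_nat board i j hi, List.getD_eq_getElem _ _ hj, hK]
    · simp [hK] at hpr
  · rintro ⟨⟨h0, h1, h2, h3⟩, hc⟩
    have hi : p.1.toNat < board.length := by omega
    have hjl : p.2.toNat < (board[p.1.toNat]).length := by
      have := rowLenA_nat board p.1.toNat hi
      rw [Int.toNat_of_nonneg h0] at this
      omega
    refine ⟨(p.1, board[p.1.toNat]), ⟨p.1.toNat, hi, by rw [Int.toNat_of_nonneg h0]⟩,
      (p.2, (board[p.1.toNat])[p.2.toNat]), ⟨p.2.toNat, hjl, by rw [Int.toNat_of_nonneg h2]⟩, ?_⟩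
    have : (board[p.1.toNat])[p.2.toNat] = "K" := by
      have hcc := cellA_nat board p.1.toNat p.2.toNat hi
      rw [Int.toNat_of_nonneg h0, Int.toNat_of_nonneg h2] at hcc
      rw [hc] at hcc
      rw [List.getD_eq_getElem _ _ hjl] at hcc
      exact hcc.symm
    simp [this]



lemma walkA_iff (board : List (List String)) (dx dy : Int) :
    ∀ (fuel : Nat) (cx cy : Int),
      walkA board fuel cx cy dx dy = true ↔
      ∃ n : Nat, n < fuel ∧ Inb board (cx + n*dx) (cy + n*dy) ∧
        cellA board (cx + n*dx) (cy + n*dy) = "K" ∧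
        ∀ t : Nat, t < n → Inb board (cx + t*dx) (cy + t*dy) ∧
          EmptyC (cellA board (cx + t*dx) (cy + t*dy)) := by
  intro fuel
  induction fuel with
  | zero => intro cx cy; simp [walkA]
  | succ f ih =>
    intro cx cy
    rw [walkA]
    by_cases hin : 0 ≤ cx ∧ cx < (board.length : Int) ∧ 0 ≤ cy ∧ cy < (rowLenA board cx : Int)
    · rw [if_pos hin]
      by_cases hK : cellA board cx cy = "K"
      · simp only [hK, if_pos]
        constructor
        · intro _
          exact ⟨0, by omega, by simpa using hin, by simpa using hK, by omega⟩
        · intro _; trivial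
      · rw [if_neg hK]
        by_cases hE : EmptyC (cellA board cx cy)
        · have hne : ¬ (cellA board cx cy ≠ "." ∧ cellA board cx cy ≠ " " ∧ cellA board cx cy ≠ "") := by
            rcases hE with h | h | h <;> simp [h]
          rw [if_neg hne, ih]
          constructor
          · rintro ⟨n, hn, hIn, hKc, hall⟩
            refine ⟨n+1, by omega, ?_, ?_, ?_⟩
            · have : cx + dx + n*dx = cx + (↑(n+1))*dx := by push_cast; ring
              have h2 : cy + dy + n*dy = cy + (↑(n+1))*dy := by push_cast; ring
              rwa [this, h2] at hIn
            · have : cx + dx + n*dx = cx + (↑(n+1))*dx := by push_cast; ring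
              have h2 : cy + dy + n*dy = cy + (↑(n+1))*dy := by push_cast; ring
              rwa [this, h2] at hKc
            · intro t ht
              cases t with
              | zero => simpa using ⟨hin, hE⟩
              | succ s =>
                have := hall s (by omega)
                have e1 : cx + dx + s*dx = cx + (↑(s+1))*dx := by push_cast; ring
                have e2 : cy + dy + s*dy = cy + (↑(s+1))*dy := by push_cast; ring
                rwa [e1, e2] at this
          · rintro ⟨n, hn, hIn, hKc, hall⟩
            cases n with
            | zero => exact absurd (by simpa using hKc) hK
            | succ m =>
              refine ⟨m, by omega, ?_, ?_, ?_⟩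
              · have e1 : cx + dx + m*dx = cx + (↑(m+1))*dx := by push_cast; ring
                have e2 : cy + dy + m*dy = cy + (↑(m+1))*dy := by push_cast; ring
                rw [e1, e2]; exact hIn
              · have e1 : cx + dx + m*dx = cx + (↑(m+1))*dx := by push_cast; ring
                have e2 : cy + dy + m*dy = cy + (↑(m+1))*dy := by push_cast; ring
                rw [e1, e2]; exact hKc
              · intro t ht
                have := hall (t+1) (by omega)
                have e1 : cx + dx + t*dx = cx + (↑(t+1))*dx := by push_cast; ring
                have e2 : cy + dy + t*dy = cy + (↑(t+1))*dy := by push_cast; ring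
                rw [e1, e2]; exact this
        · have hne : (cellA board cx cy ≠ "." ∧ cellA board cx cy ≠ " " ∧ cellA board cx cy ≠ "") := by
            simp only [EmptyC, not_or] at hE; exact ⟨hE.1, hE.2.1, hE.2.2⟩
          rw [if_pos hne]
          simp only [Bool.false_eq_true, false_iff]
          rintro ⟨n, hn, hIn, hKc, hall⟩
          cases n with
          | zero => exact hK (by simpa using hKc)
          | succ m => exact hE (by simpa using (hall 0 (by omega)).2)
    · rw [if_neg hin]
      simp only [Bool.false_eq_true, false_iff]
      rintro ⟨n, hn, hIn, hKc, hall⟩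
      cases n with
      | zero => exact hin (by simpa [Inb] using hIn)
      | succ m => exact hin (by simpa [Inb] using (hall 0 (by omega)).1)


-- the boolean "good target" test of B's walk, at a board position
def GB (board : List (List String)) (krows kcols : PySem.Set Int) (x y : Int) : Prop :=
  cellA board x y = "B" ∨
    (cellA board x y = "Q" ∧ (PySem.Set.contains krows x || PySem.Set.contains kcols y) = true)

lemma walkB_iff (board : List (List String)) (krows kcols : PySem.Set Int) (dx dy : Int) :
    ∀ (fuel : Nat) (cx cy : Int),
      walkB board krows kcols fuel cx cy dx dy = true ↔
      ∃ n : Nat, n < fuel ∧ Inb board (cx + n*dx) (cy + n*dy) ∧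
        GB board krows kcols (cx + n*dx) (cy + n*dy) ∧
        ∀ t : Nat, t < n → Inb board (cx + t*dx) (cy + t*dy) ∧
          EmptyC (cellA board (cx + t*dx) (cy + t*dy)) := by
  intro fuel
  induction fuel with
  | zero => intro cx cy; simp [walkB]
  | succ f ih =>
    intro cx cy
    rw [walkB]
    by_cases hin : 0 ≤ cx ∧ cx < (board.length : Int) ∧ 0 ≤ cy ∧ cy < (rowLenA board cx : Int)
    · rw [if_pos hin]
      by_cases hg : GB board krows kcols cx cy
      · have hT : (if cellA board cx cy = "B" then true
            else if cellA board cx cy = "Q" ∧ (PySem.Set.contains krows cx || PySem.Set.contains kcols cy) = true then true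
            else if cellA board cx cy ≠ "." ∧ cellA board cx cy ≠ " " ∧ cellA board cx cy ≠ "" then false
            else walkB board krows kcols f (cx+dx) (cy+dy) dx dy) = true := by
          rcases hg with h | h
          · rw [if_pos h]
          · rw [if_neg (by simp [h.1]), if_pos h]
        rw [hT]
        constructor
        · intro _
          exact ⟨0, by omega, by simpa using hin, by simpa using hg, by omega⟩
        · intro _; trivial
      · have hB : cellA board cx cy ≠ "B" := fun h => hg (Or.inl h)
        have hQ : ¬ (cellA board cx cy = "Q" ∧ (PySem.Set.contains krows cx || PySem.Set.contains kcols cy) = true) :=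
          fun h => hg (Or.inr h)
        rw [if_neg hB, if_neg hQ]
        by_cases hE : EmptyC (cellA board cx cy)
        · have hne : ¬ (cellA board cx cy ≠ "." ∧ cellA board cx cy ≠ " " ∧ cellA board cx cy ≠ "") := by
            rcases hE with h | h | h <;> simp [h]
          rw [if_neg hne, ih]
          constructor
          · rintro ⟨n, hn, hIn, hKc, hall⟩
            refine ⟨n+1, by omega, ?_, ?_, ?_⟩
            · have e1 : cx + dx + n*dx = cx + (↑(n+1))*dx := by push_cast; ring
              have e2 : cy + dy + n*dy = cy + (↑(n+1))*dy := by push_cast; ring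
              rwa [e1, e2] at hIn
            · have e1 : cx + dx + n*dx = cx + (↑(n+1))*dx := by push_cast; ring
              have e2 : cy + dy + n*dy = cy + (↑(n+1))*dy := by push_cast; ring
              rwa [e1, e2] at hKc
            · intro t ht
              cases t with
              | zero => simpa using ⟨hin, hE⟩
              | succ s =>
                have := hall s (by omega)
                have e1 : cx + dx + s*dx = cx + (↑(s+1))*dx := by push_cast; ring
                have e2 : cy + dy + s*dy = cy + (↑(s+1))*dy := by push_cast; ring
                rwa [e1, e2] at this
          · rintro ⟨n, hn, hIn, hKc, hall⟩
            cases n with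
            | zero => exact absurd (by simpa using hKc) hg
            | succ m =>
              refine ⟨m, by omega, ?_, ?_, ?_⟩
              · have e1 : cx + dx + m*dx = cx + (↑(m+1))*dx := by push_cast; ring
                have e2 : cy + dy + m*dy = cy + (↑(m+1))*dy := by push_cast; ring
                rw [e1, e2]; exact hIn
              · have e1 : cx + dx + m*dx = cx + (↑(m+1))*dx := by push_cast; ring
                have e2 : cy + dy + m*dy = cy + (↑(m+1))*dy := by push_cast; ring
                rw [e1, e2]; exact hKc
              · intro t ht
                have := hall (t+1) (by omega)
                have e1 : cx + dx + t*dx = cx + (↑(t+1))*dx := by push_cast; ring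
                have e2 : cy + dy + t*dy = cy + (↑(t+1))*dy := by push_cast; ring
                rw [e1, e2]; exact this
        · have hne : (cellA board cx cy ≠ "." ∧ cellA board cx cy ≠ " " ∧ cellA board cx cy ≠ "") := by
            simp only [EmptyC, not_or] at hE; exact ⟨hE.1, hE.2.1, hE.2.2⟩
          rw [if_pos hne]
          simp only [Bool.false_eq_true, false_iff]
          rintro ⟨n, hn, hIn, hKc, hall⟩
          cases n with
          | zero => exact hg (by simpa using hKc)
          | succ m => exact hE (by simpa using (hall 0 (by omega)).2)
    · rw [if_neg hin]
      simp only [Bool.false_eq_true, false_iff]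
      rintro ⟨n, hn, hIn, hKc, hall⟩
      cases n with
      | zero => exact hin (by simpa [Inb] using hIn)
      | succ m => exact hin (by simpa [Inb] using (hall 0 (by omega)).1)


lemma shift_step (a d : Int) (m : Nat) : a + d + (m:Int)*d = a + ((m:Int)+1)*d := by ring

lemma fuel_bound (board : List (List String)) {sx sy dx dy : Int} {n : Nat}
    (hdx : dx = 1 ∨ dx = -1)
    (hIn : Inb board (sx + n*dx) (sy + n*dy))
    (hall : ∀ t : Nat, t < n → Inb board (sx + t*dx) (sy + t*dy) ∧
      EmptyC (cellA board (sx + t*dx) (sy + t*dy))) :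
    n < board.length + 1 := by
  cases n with
  | zero => have := hIn.2.1; omega
  | succ m =>
    have h0 := (hall 0 (by omega)).1
    simp only [Nat.cast_zero, zero_mul, add_zero] at h0
    obtain ⟨ha, hb, -, -⟩ := h0
    obtain ⟨hc, hd, -, -⟩ := hIn
    rcases hdx with rfl | rfl
    · simp only [mul_one] at hc hd; omega
    · simp only [mul_neg_one] at hc hd; omega

lemma walkA_seg_iff (board : List (List String)) (x y : Int) (d : Int × Int)
    (hdx : d.1 = 1 ∨ d.1 = -1) :
    walkA board (board.length + 1) (x + d.1) (y + d.2) d.1 d.2 = true ↔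
      ∃ k : Int × Int, ∃ n : Nat, IsK board k.1 k.2 ∧ Seg board (x, y) k d n := by
  rw [walkA_iff]
  constructor
  · rintro ⟨n, hn, hIn, hK, hall⟩
    rw [shift_step x d.1 n, shift_step y d.2 n] at hIn hK
    refine ⟨(x + ((n:Int)+1)*d.1, y + ((n:Int)+1)*d.2), n, ⟨hIn, hK⟩, rfl, rfl, ?_⟩
    intro t ht
    have := hall t (by omega)
    rwa [shift_step x d.1 t, shift_step y d.2 t] at this
  · rintro ⟨k, n, ⟨hIn, hK⟩, hq1, hq2, hall⟩
    have hall' : ∀ t : Nat, t < n → Inb board (x + d.1 + t*d.1) (y + d.2 + t*d.2) ∧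
        EmptyC (cellA board (x + d.1 + t*d.1) (y + d.2 + t*d.2)) := by
      intro t ht
      rw [shift_step x d.1 t, shift_step y d.2 t]
      exact hall t ht
    have hIn' : Inb board (x + d.1 + n*d.1) (y + d.2 + n*d.2) := by
      rw [shift_step x d.1 n, shift_step y d.2 n, ← hq1, ← hq2]; exact hIn
    refine ⟨n, fuel_bound board hdx hIn' hall', hIn', ?_, hall'⟩
    rw [shift_step x d.1 n, shift_step y d.2 n, ← hq1, ← hq2]; exact hK

lemma walkB_seg_iff (board : List (List String)) (krows kcols : PySem.Set Int)
    (x y : Int) (d : Int × Int) (hdx : d.1 = 1 ∨ d.1 = -1) :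
    walkB board krows kcols (board.length + 1) (x + d.1) (y + d.2) d.1 d.2 = true ↔
      ∃ a : Int × Int, ∃ n : Nat, Inb board a.1 a.2 ∧ GB board krows kcols a.1 a.2 ∧
        Seg board (x, y) a d n := by
  rw [walkB_iff]
  constructor
  · rintro ⟨n, hn, hIn, hK, hall⟩
    rw [shift_step x d.1 n, shift_step y d.2 n] at hIn hK
    refine ⟨(x + ((n:Int)+1)*d.1, y + ((n:Int)+1)*d.2), n, hIn, hK, rfl, rfl, ?_⟩
    intro t ht
    have := hall t (by omega)
    rwa [shift_step x d.1 t, shift_step y d.2 t] at this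
  · rintro ⟨a, n, hIn, hK, hq1, hq2, hall⟩
    have hall' : ∀ t : Nat, t < n → Inb board (x + d.1 + t*d.1) (y + d.2 + t*d.2) ∧
        EmptyC (cellA board (x + d.1 + t*d.1) (y + d.2 + t*d.2)) := by
      intro t ht
      rw [shift_step x d.1 t, shift_step y d.2 t]
      exact hall t ht
    have hIn' : Inb board (x + d.1 + n*d.1) (y + d.2 + n*d.2) := by
      rw [shift_step x d.1 n, shift_step y d.2 n, ← hq1, ← hq2]; exact hIn
    refine ⟨n, fuel_bound board hdx hIn' hall', hIn', ?_, hall'⟩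
    rw [shift_step x d.1 n, shift_step y d.2 n, ← hq1, ← hq2]; exact hK

lemma seg_symm (board : List (List String)) (p q d : Int × Int) (n : Nat)
    (h : Seg board p q d n) : Seg board q p (-d.1, -d.2) n := by
  obtain ⟨h1, h2, hall⟩ := h
  refine ⟨by dsimp only; rw [h1]; ring, by dsimp only; rw [h2]; ring, ?_⟩
  intro t ht
  have hmain := hall (n - 1 - t) (by omega)
  have hc : ((n - 1 - t : Nat) : Int) = (n : Int) - 1 - t := by omega
  have e1 : q.1 + ((t:Int)+1) * (-d.1, -d.2).1 = p.1 + (((n - 1 - t : Nat):Int)+1) * d.1 := by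
    dsimp only; rw [h1, hc]; ring
  have e2 : q.2 + ((t:Int)+1) * (-d.1, -d.2).2 = p.2 + (((n - 1 - t : Nat):Int)+1) * d.2 := by
    dsimp only; rw [h2, hc]; ring
  rw [e1, e2]
  exact hmain


lemma rowLenA_int (board : List (List String)) (i : Int) (h0 : 0 ≤ i) (h1 : i < (board.length : Int)) :
    rowLenA board i = (board[i.toNat]'(by omega)).length := by
  have := rowLenA_nat board i.toNat (by omega)
  rwa [Int.toNat_of_nonneg h0] at this

lemma cellA_int (board : List (List String)) (i j : Int) (h0 : 0 ≤ i) (h1 : i < (board.length : Int))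
    (h2 : 0 ≤ j) :
    cellA board i j = (board[i.toNat]'(by omega)).getD j.toNat "" := by
  have := cellA_nat board i.toNat j.toNat (by omega)
  rwa [Int.toNat_of_nonneg h0, Int.toNat_of_nonneg h2] at this

lemma rect_lenI (board : List (List String)) (hP : Rect board)
    {i i' : Int} (h0 : 0 ≤ i) (h1 : i < (board.length : Int))
    (h0' : 0 ≤ i') (h1' : i' < (board.length : Int)) :
    rowLenA board i = rowLenA board i' := by
  rw [rowLenA_int board i h0 h1, rowLenA_int board i' h0' h1']
  exact hP _ (List.getElem_mem (by omega)) _ (List.getElem_mem (by omega))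

lemma pawn_iff (board : List (List String)) (hP : Rect board) (x y : Int)
    (hIn : Inb board x y) :
    pawnMoveA board x y = true ↔ IsK board (x-1) (y-1) ∨ IsK board (x-1) (y+1) := by
  obtain ⟨hx0, hx1, hy0, hy1⟩ := hIn
  unfold pawnMoveA
  by_cases hx : 0 ≤ x - 1
  · rw [if_pos hx]
    have hlen : rowLenA board (x-1) = rowLenA board x :=
      rect_lenI board hP hx (by omega) hx0 hx1
    constructor
    · intro h
      by_cases h1 : 0 ≤ y - 1 ∧ cellA board (x-1) (y-1) = "K"
      · exact Or.inl ⟨⟨hx, by omega, h1.1, by omega⟩, h1.2⟩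
      · rw [if_neg h1] at h
        by_cases h2 : y + 1 < (rowLenA board x : Int) ∧ cellA board (x-1) (y+1) = "K"
        · exact Or.inr ⟨⟨hx, by omega, by omega, by omega⟩, h2.2⟩
        · rw [if_neg h2] at h; exact absurd h (by simp)
    · rintro (⟨⟨-, -, hy, -⟩, hc⟩ | ⟨⟨-, -, -, hy⟩, hc⟩)
      · rw [if_pos ⟨hy, hc⟩]
      · by_cases h1 : 0 ≤ y - 1 ∧ cellA board (x-1) (y-1) = "K"
        · rw [if_pos h1]
        · rw [if_neg h1, if_pos ⟨by omega, hc⟩]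
  · rw [if_neg hx]
    simp only [Bool.false_eq_true, false_iff]
    rintro (⟨⟨h, -⟩, -⟩ | ⟨⟨h, -⟩, -⟩) <;> omega

lemma rook_iff (board : List (List String)) (hP : Rect board) (x y : Int)
    (hIn : Inb board x y) :
    rookMoveA board x y = true ↔ RCp board x y := by
  obtain ⟨hx0, hx1, hy0, hy1⟩ := hIn
  unfold rookMoveA
  rw [List.any_eq_true]
  constructor
  · rintro ⟨i, hi, hf⟩
    rw [List.mem_range] at hi
    rcases Bool.or_eq_true _ _ |>.mp hf with hc | hc
    · rw [decide_eq_true_iff] at hc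
      refine Or.inr ⟨((i : Int), y), ?_, rfl⟩
      rw [kings_mem]
      dsimp only
      refine ⟨⟨by positivity, by exact_mod_cast hi, hy0, ?_⟩, hc⟩
      rw [rect_lenI board hP (by positivity) (by exact_mod_cast hi) hx0 hx1]
      omega
    · rw [Bool.and_eq_true, decide_eq_true_iff] at hc
      obtain ⟨hix, hany⟩ := hc
      rw [List.any_eq_true] at hany
      obtain ⟨j, hj, hcj⟩ := hany
      rw [List.mem_range] at hj
      rw [decide_eq_true_iff] at hcj
      refine Or.inl ⟨(x, (j : Int)), ?_, rfl⟩
      rw [kings_mem]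
      dsimp only
      refine ⟨⟨hx0, hx1, by positivity, ?_⟩, by rwa [hix] at hcj⟩
      rw [← hix]; exact_mod_cast hj
  · rintro (⟨k, hk, hk1⟩ | ⟨k, hk, hk2⟩)
    · obtain ⟨⟨h0, h1, h2, h3⟩, hc⟩ := (kings_mem board k).mp hk
      refine ⟨x.toNat, by rw [List.mem_range]; omega, ?_⟩
      apply Bool.or_eq_true _ _ |>.mpr
      right
      rw [Bool.and_eq_true, decide_eq_true_iff]
      refine ⟨Int.toNat_of_nonneg hx0, ?_⟩
      rw [List.any_eq_true]
      refine ⟨k.2.toNat, ?_, ?_⟩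
      · rw [List.mem_range, Int.toNat_of_nonneg hx0, ← hk1]; omega
      · rw [decide_eq_true_iff, Int.toNat_of_nonneg hx0, Int.toNat_of_nonneg h2, ← hk1]; exact hc
    · obtain ⟨⟨h0, h1, h2, h3⟩, hc⟩ := (kings_mem board k).mp hk
      refine ⟨k.1.toNat, by rw [List.mem_range]; omega, ?_⟩
      apply Bool.or_eq_true _ _ |>.mpr
      left
      rw [decide_eq_true_iff, Int.toNat_of_nonneg h0, ← hk2]
      exact hc


lemma contains_rows (board : List (List String)) (x : Int) :
    PySem.Set.contains (PySem.Set.ofList ((kingsOf board).map Prod.fst)) x = true ↔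
      ∃ k ∈ kingsOf board, k.1 = x := by
  rw [PySem.Set.contains_iff, PySem.Set.mem_ofList, List.mem_map]

lemma contains_cols (board : List (List String)) (y : Int) :
    PySem.Set.contains (PySem.Set.ofList ((kingsOf board).map Prod.snd)) y = true ↔
      ∃ k ∈ kingsOf board, k.2 = y := by
  rw [PySem.Set.contains_iff, PySem.Set.mem_ofList, List.mem_map]

lemma contains_kset (board : List (List String)) (p : Int × Int) :
    PySem.Set.contains (PySem.Set.ofList (kingsOf board)) p = true ↔ IsK board p.1 p.2 := by
  rw [PySem.Set.contains_iff, PySem.Set.mem_ofList, kings_mem]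

lemma GB_iff (board : List (List String)) (x y : Int) :
    GB board (PySem.Set.ofList ((kingsOf board).map Prod.fst))
      (PySem.Set.ofList ((kingsOf board).map Prod.snd)) x y ↔ GoodP board x y := by
  unfold GB GoodP RCp
  rw [Bool.or_eq_true, contains_rows, contains_cols]

-- the threat decompositions both programs are proved equal to
def PawnT (board : List (List String)) : Prop :=
  ∃ p : Int × Int, Inb board p.1 p.2 ∧ cellA board p.1 p.2 = "P" ∧
    (IsK board (p.1-1) (p.2-1) ∨ IsK board (p.1-1) (p.2+1))

def RookT (board : List (List String)) : Prop :=
  ∃ p : Int × Int, Inb board p.1 p.2 ∧ cellA board p.1 p.2 = "R" ∧ RCp board p.1 p.2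

def DiagT (board : List (List String)) : Prop :=
  ∃ p : Int × Int, Inb board p.1 p.2 ∧ GoodP board p.1 p.2 ∧
    ∃ d : Int × Int, (d.1 = 1 ∨ d.1 = -1) ∧ (d.2 = 1 ∨ d.2 = -1) ∧
      ∃ k : Int × Int, ∃ n : Nat, IsK board k.1 k.2 ∧ Seg board p k d n

def DiagTK (board : List (List String)) : Prop :=
  ∃ k : Int × Int, IsK board k.1 k.2 ∧
    ∃ d : Int × Int, (d.1 = 1 ∨ d.1 = -1) ∧ (d.2 = 1 ∨ d.2 = -1) ∧
      ∃ a : Int × Int, ∃ n : Nat, Inb board a.1 a.2 ∧ GoodP board a.1 a.2 ∧ Seg board k a d n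

lemma diag_symm_iff (board : List (List String)) : DiagT board ↔ DiagTK board := by
  constructor
  · rintro ⟨p, hInb, hG, d, hd1, hd2, k, n, hK, hSeg⟩
    exact ⟨k, hK, (-d.1, -d.2), by rcases hd1 with h | h <;> simp [h],
      by rcases hd2 with h | h <;> simp [h], p, n, hInb, hG, seg_symm board p k d n hSeg⟩
  · rintro ⟨k, hK, d, hd1, hd2, a, n, hInb, hG, hSeg⟩
    exact ⟨a, hInb, hG, (-d.1, -d.2), by rcases hd1 with h | h <;> simp [h],
      by rcases hd2 with h | h <;> simp [h], k, n, hK, seg_symm board k a d n hSeg⟩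

lemma bishopA_iff (board : List (List String)) (x y : Int) :
    bishopMoveA board x y = true ↔
      ∃ d : Int × Int, (d.1 = 1 ∨ d.1 = -1) ∧ (d.2 = 1 ∨ d.2 = -1) ∧
        ∃ k : Int × Int, ∃ n : Nat, IsK board k.1 k.2 ∧ Seg board (x, y) k d n := by
  unfold bishopMoveA
  rw [List.any_eq_true]
  constructor
  · rintro ⟨d, hd, hw⟩
    have hd1 : d.1 = 1 ∨ d.1 = -1 := by
      fin_cases hd <;> simp
    have hd2 : d.2 = 1 ∨ d.2 = -1 := by
      fin_cases hd <;> simp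
    obtain ⟨k, n, hK, hSeg⟩ := (walkA_seg_iff board x y d hd1).mp hw
    exact ⟨d, hd1, hd2, k, n, hK, hSeg⟩
  · rintro ⟨d, hd1, hd2, k, n, hK, hSeg⟩
    refine ⟨d, ?_, (walkA_seg_iff board x y d hd1).mpr ⟨k, n, hK, hSeg⟩⟩
    have : d = (d.1, d.2) := rfl
    rw [this]
    rcases hd1 with h | h <;> rcases hd2 with h' | h' <;> simp [h, h']


lemma noPRQ_cell (board : List (List String)) (hN : NoPRQ board) (x y : Int)
    (hIn : Inb board x y) :
    cellA board x y ≠ "P" ∧ cellA board x y ≠ "R" ∧ cellA board x y ≠ "Q" := by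
  obtain ⟨h0, h1, h2, h3⟩ := hIn
  have hj : y.toNat < (board[x.toNat]'(by omega)).length := by
    have := rowLenA_int board x h0 h1
    omega
  rw [cellA_int board x y h0 h1 h2, List.getD_eq_getElem _ "" hj]
  exact hN _ (List.getElem_mem (by omega)) _ (List.getElem_mem hj)

lemma A_iff (board : List (List String)) (hP : Pre_moveThePiece board) :
    moveThePiece board = true ↔ PawnT board ∨ RookT board ∨ DiagT board := by
  unfold moveThePiece
  rw [List.any_eq_true]
  constructor
  · rintro ⟨i, hi, hinner⟩
    rw [List.mem_range] at hi
    rw [List.any_eq_true] at hinner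
    obtain ⟨j, hj, hbranch⟩ := hinner
    rw [List.mem_range] at hj
    have hInb : Inb board (i : Int) (j : Int) :=
      ⟨by positivity, by exact_mod_cast hi, by positivity, by exact_mod_cast hj⟩
    simp only at hbranch
    by_cases hcP : cellA board (i : Int) (j : Int) = "P"
    · rw [if_pos hcP] at hbranch
      rcases hP with hR | hN
      · exact Or.inl ⟨((i:Int), (j:Int)), hInb, hcP, (pawn_iff board hR _ _ hInb).mp hbranch⟩
      · exact absurd hcP (noPRQ_cell board hN _ _ hInb).1
    · rw [if_neg hcP] at hbranch
      by_cases hcB : cellA board (i : Int) (j : Int) = "B"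
      · rw [if_pos hcB] at hbranch
        obtain ⟨d, hd1, hd2, k, n, hK, hSeg⟩ := (bishopA_iff board _ _).mp hbranch
        exact Or.inr (Or.inr ⟨((i:Int), (j:Int)), hInb, Or.inl hcB, d, hd1, hd2, k, n, hK, hSeg⟩)
      · rw [if_neg hcB] at hbranch
        by_cases hcR : cellA board (i : Int) (j : Int) = "R"
        · rw [if_pos hcR] at hbranch
          rcases hP with hR | hN
          · exact Or.inr (Or.inl ⟨((i:Int), (j:Int)), hInb, hcR, (rook_iff board hR _ _ hInb).mp hbranch⟩)
          · exact absurd hcR (noPRQ_cell board hN _ _ hInb).2.1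
        · rw [if_neg hcR] at hbranch
          by_cases hcQ : cellA board (i : Int) (j : Int) = "Q"
          · rcases hP with hR | hN
            · rw [if_pos hcQ] at hbranch
              unfold queenMoveA at hbranch
              by_cases hr : rookMoveA board (i : Int) (j : Int) = true
              · rw [if_neg (by simpa using hr)] at hbranch
                by_cases hb : bishopMoveA board (i : Int) (j : Int) = true
                · obtain ⟨d, hd1, hd2, k, n, hK, hSeg⟩ := (bishopA_iff board _ _).mp hb
                  exact Or.inr (Or.inr ⟨((i:Int), (j:Int)), hInb,
                    Or.inr ⟨hcQ, (rook_iff board hR _ _ hInb).mp hr⟩, d, hd1, hd2, k, n, hK, hSeg⟩)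
                · rw [if_pos (by simpa using hb)] at hbranch
                  exact absurd hbranch (by simp)
              · rw [if_pos (by simpa using hr)] at hbranch
                exact absurd hbranch (by simp)
            · exact absurd hcQ (noPRQ_cell board hN _ _ hInb).2.2
          · rw [if_neg hcQ] at hbranch
            exact absurd hbranch (by simp)
  · intro h
    have build : ∀ p : Int × Int, Inb board p.1 p.2 →
        (fun j => (fun c =>
          if c = "P" then pawnMoveA board p.1 (j:Int)
          else if c = "B" then bishopMoveA board p.1 (j:Int)
          else if c = "R" then rookMoveA board p.1 (j:Int)
          else if c = "Q" then queenMoveA board p.1 (j:Int)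
          else false) (cellA board p.1 (j:Int))) p.2.toNat = true →
        ∃ i ∈ List.range board.length,
          ((List.range (rowLenA board (i:Int))).any fun j =>
            let c := cellA board (i:Int) (j:Int)
            if c = "P" then pawnMoveA board (i:Int) (j:Int)
            else if c = "B" then bishopMoveA board (i:Int) (j:Int)
            else if c = "R" then rookMoveA board (i:Int) (j:Int)
            else if c = "Q" then queenMoveA board (i:Int) (j:Int)
            else false) = true := by
      rintro p ⟨h0, h1, h2, h3⟩ hval
      refine ⟨p.1.toNat, by rw [List.mem_range]; omega, ?_⟩
      rw [List.any_eq_true]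
      refine ⟨p.2.toNat, ?_, ?_⟩
      · rw [List.mem_range, Int.toNat_of_nonneg h0]
        omega
      · simp only
        rw [Int.toNat_of_nonneg h0]
        exact hval
    rcases h with ⟨p, hInb, hc, hK⟩ | ⟨p, hInb, hc, hRC⟩ | ⟨p, hInb, hG, d, hd1, hd2, k, n, hKk, hSeg⟩
    · rcases hP with hR | hN
      · refine build p hInb ?_
        simp only
        rw [Int.toNat_of_nonneg hInb.2.2.1, if_pos hc]
        exact (pawn_iff board hR _ _ hInb).mpr hK
      · exact absurd hc (noPRQ_cell board hN _ _ hInb).1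
    · rcases hP with hR | hN
      · refine build p hInb ?_
        simp only
        rw [Int.toNat_of_nonneg hInb.2.2.1]
        rw [if_neg (by rw [hc]; decide), if_neg (by rw [hc]; decide), if_pos hc]
        exact (rook_iff board hR _ _ hInb).mpr hRC
      · exact absurd hc (noPRQ_cell board hN _ _ hInb).2.1
    · have hbsh : bishopMoveA board p.1 p.2 = true :=
        (bishopA_iff board _ _).mpr ⟨d, hd1, hd2, k, n, hKk, hSeg⟩
      rcases hG with hB | ⟨hQ, hRC⟩
      · refine build p hInb ?_
        simp only
        rw [Int.toNat_of_nonneg hInb.2.2.1]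
        rw [if_neg (by rw [hB]; decide), if_pos hB]
        exact hbsh
      · rcases hP with hR | hN
        · refine build p hInb ?_
          simp only
          rw [Int.toNat_of_nonneg hInb.2.2.1]
          rw [if_neg (by rw [hQ]; decide), if_neg (by rw [hQ]; decide),
            if_neg (by rw [hQ]; decide), if_pos hQ]
          unfold queenMoveA
          rw [if_neg (by simpa using (rook_iff board hR _ _ hInb).mpr hRC),
            if_neg (by simpa using hbsh)]
        · exact absurd hQ (noPRQ_cell board hN _ _ hInb).2.2

lemma scan_iff (board : List (List String)) :
    scanPR board (PySem.Set.ofList (kingsOf board))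
      (PySem.Set.ofList ((kingsOf board).map Prod.fst))
      (PySem.Set.ofList ((kingsOf board).map Prod.snd)) = true ↔
    PawnT board ∨ RookT board := by
  unfold scanPR
  rw [List.any_eq_true]
  constructor
  · rintro ⟨p, hp, hinner⟩
    rw [PySem.List.mem_enumerate_iff] at hp
    obtain ⟨i, hi, rfl⟩ := hp
    rw [List.any_eq_true] at hinner
    obtain ⟨q, hq, hbool⟩ := hinner
    rw [PySem.List.mem_enumerate_iff] at hq
    obtain ⟨j, hj, rfl⟩ := hq
    simp only [zero_add] at hbool ⊢
    have hInb : Inb board (i : Int) (j : Int) := by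
      refine ⟨by positivity, by exact_mod_cast hi, by positivity, ?_⟩
      rw [rowLenA_nat board i hi]
      exact_mod_cast hj
    have hcell : cellA board (i : Int) (j : Int) = (board[i])[j] := by
      rw [cellA_nat board i j hi, List.getD_eq_getElem _ _ hj]
    rcases Bool.or_eq_true _ _ |>.mp hbool with hc | hc
    · rw [Bool.and_eq_true, beq_iff_eq] at hc
      obtain ⟨hP', hor⟩ := hc
      refine Or.inl ⟨((i:Int), (j:Int)), hInb, by rw [hcell]; exact hP', ?_⟩
      rcases Bool.or_eq_true _ _ |>.mp hor with h | h
      · exact Or.inl ((contains_kset board _).mp h)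
      · exact Or.inr ((contains_kset board _).mp h)
    · rw [Bool.and_eq_true, beq_iff_eq] at hc
      obtain ⟨hR', hor⟩ := hc
      refine Or.inr ⟨((i:Int), (j:Int)), hInb, by rw [hcell]; exact hR', ?_⟩
      rcases Bool.or_eq_true _ _ |>.mp hor with h | h
      · exact Or.inl ((contains_rows board _).mp h)
      · exact Or.inr ((contains_cols board _).mp h)
  · intro h
    have build : ∀ p : Int × Int, Inb board p.1 p.2 →
        ∀ hi : p.1.toNat < board.length, ∀ hj : p.2.toNat < (board[p.1.toNat]).length,
        ((((board[p.1.toNat])[p.2.toNat] == "P") &&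
            (PySem.Set.contains (PySem.Set.ofList (kingsOf board)) (p.1 - 1, p.2 - 1)
              || PySem.Set.contains (PySem.Set.ofList (kingsOf board)) (p.1 - 1, p.2 + 1)))
          || (((board[p.1.toNat])[p.2.toNat] == "R") &&
              (PySem.Set.contains (PySem.Set.ofList ((kingsOf board).map Prod.fst)) p.1
                || PySem.Set.contains (PySem.Set.ofList ((kingsOf board).map Prod.snd)) p.2))) = true →
        ∃ r ∈ PySem.List.enumerate board 0,
          ((PySem.List.enumerate r.2 0).any fun q =>
            (q.2 == "P" && (PySem.Set.contains (PySem.Set.ofList (kingsOf board)) (r.1 - 1, q.1 - 1)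
                || PySem.Set.contains (PySem.Set.ofList (kingsOf board)) (r.1 - 1, q.1 + 1)))
            || (q.2 == "R" && (PySem.Set.contains (PySem.Set.ofList ((kingsOf board).map Prod.fst)) r.1
                || PySem.Set.contains (PySem.Set.ofList ((kingsOf board).map Prod.snd)) q.1))) = true := by
      rintro p ⟨h0, h1, h2, h3⟩ hi hj hval
      refine ⟨((p.1.toNat : Int), board[p.1.toNat]), ?_, ?_⟩
      · rw [PySem.List.mem_enumerate_iff]
        exact ⟨p.1.toNat, hi, by rw [zero_add]⟩
      · rw [List.any_eq_true]
        refine ⟨((p.2.toNat : Int), (board[p.1.toNat])[p.2.toNat]), ?_, ?_⟩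
        · rw [PySem.List.mem_enumerate_iff]
          exact ⟨p.2.toNat, hj, by rw [zero_add]⟩
        · simp only
          rw [Int.toNat_of_nonneg h0, Int.toNat_of_nonneg h2]
          exact hval
    rcases h with ⟨p, hInb, hc, hK⟩ | ⟨p, hInb, hc, hRC⟩
    · obtain ⟨h0, h1, h2, h3⟩ := hInb
      have hi : p.1.toNat < board.length := by omega
      have hj : p.2.toNat < (board[p.1.toNat]).length := by
        have := rowLenA_int board p.1 h0 h1
        omega
      refine build p ⟨h0, h1, h2, h3⟩ hi hj ?_
      have hcell : (board[p.1.toNat])[p.2.toNat] = "P" := by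
        rw [← List.getD_eq_getElem _ "" hj, ← cellA_int board p.1 p.2 h0 h1 h2]
        exact hc
      apply Bool.or_eq_true _ _ |>.mpr
      left
      rw [Bool.and_eq_true, beq_iff_eq]
      refine ⟨hcell, ?_⟩
      apply Bool.or_eq_true _ _ |>.mpr
      rcases hK with hK | hK
      · exact Or.inl ((contains_kset board _).mpr hK)
      · exact Or.inr ((contains_kset board _).mpr hK)
    · obtain ⟨h0, h1, h2, h3⟩ := hInb
      have hi : p.1.toNat < board.length := by omega
      have hj : p.2.toNat < (board[p.1.toNat]).length := by
        have := rowLenA_int board p.1 h0 h1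
        omega
      refine build p ⟨h0, h1, h2, h3⟩ hi hj ?_
      have hcell : (board[p.1.toNat])[p.2.toNat] = "R" := by
        rw [← List.getD_eq_getElem _ "" hj, ← cellA_int board p.1 p.2 h0 h1 h2]
        exact hc
      apply Bool.or_eq_true _ _ |>.mpr
      right
      rw [Bool.and_eq_true, beq_iff_eq]
      refine ⟨hcell, ?_⟩
      apply Bool.or_eq_true _ _ |>.mpr
      rcases hRC with h | h
      · exact Or.inl ((contains_rows board _).mpr h)
      · exact Or.inr ((contains_cols board _).mpr h)

lemma diagB_iff (board : List (List String)) :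
    ((kingsOf board).any fun k =>
      ([((-1:Int),(-1:Int)), (-1,1), (1,-1), (1,1)]).any fun d =>
        walkB board (PySem.Set.ofList ((kingsOf board).map Prod.fst))
          (PySem.Set.ofList ((kingsOf board).map Prod.snd))
          (board.length + 1) (k.1 + d.1) (k.2 + d.2) d.1 d.2) = true ↔
    DiagTK board := by
  rw [List.any_eq_true]
  constructor
  · rintro ⟨k, hk, hd⟩
    rw [List.any_eq_true] at hd
    obtain ⟨d, hdm, hw⟩ := hd
    have hd1 : d.1 = 1 ∨ d.1 = -1 := by fin_cases hdm <;> simp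
    have hd2 : d.2 = 1 ∨ d.2 = -1 := by fin_cases hdm <;> simp
    obtain ⟨a, n, hIn, hG, hSeg⟩ := (walkB_seg_iff board _ _ k.1 k.2 d hd1).mp hw
    exact ⟨k, (kings_mem board k).mp hk, d, hd1, hd2, a, n, hIn,
      (GB_iff board a.1 a.2).mp hG, hSeg⟩
  · rintro ⟨k, hK, d, hd1, hd2, a, n, hIn, hG, hSeg⟩
    refine ⟨k, (kings_mem board k).mpr hK, ?_⟩
    rw [List.any_eq_true]
    refine ⟨d, ?_, (walkB_seg_iff board _ _ k.1 k.2 d hd1).mpr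
      ⟨a, n, hIn, (GB_iff board a.1 a.2).mpr hG, hSeg⟩⟩
    have : d = (d.1, d.2) := rfl
    rw [this]
    rcases hd1 with h | h <;> rcases hd2 with h' | h' <;> simp [h, h']

lemma no_kings_no_threat (board : List (List String)) (hnil : kingsOf board = []) :
    ¬ (PawnT board ∨ RookT board ∨ DiagTK board) := by
  rintro (⟨p, -, -, hK | hK⟩ | ⟨p, -, -, hRC⟩ | ⟨k, hK, -⟩)
  · exact absurd ((kings_mem board (p.1 - 1, p.2 - 1)).mpr hK) (by rw [hnil]; simp)
  · exact absurd ((kings_mem board (p.1 - 1, p.2 + 1)).mpr hK) (by rw [hnil]; simp)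
  · rcases hRC with ⟨k, hk, -⟩ | ⟨k, hk, -⟩ <;> rw [hnil] at hk <;> simp at hk
  · exact absurd ((kings_mem board _).mpr hK) (by rw [hnil]; simp)

lemma B_iff (board : List (List String)) :
    moveThePiece_alt board = true ↔ PawnT board ∨ RookT board ∨ DiagTK board := by
  unfold moveThePiece_alt
  by_cases hemp : (kingsOf board).isEmpty
  · simp only [hemp, if_true]
    rw [List.isEmpty_iff] at hemp
    simp only [Bool.false_eq_true, false_iff]
    exact no_kings_no_threat board hemp
  · simp only [hemp, Bool.false_eq_true, if_false]
    by_cases hscan : scanPR board (PySem.Set.ofList (kingsOf board))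
        (PySem.Set.ofList ((kingsOf board).map Prod.fst))
        (PySem.Set.ofList ((kingsOf board).map Prod.snd)) = true
    · rw [if_pos hscan]
      simp only [true_iff]
      exact Or.imp id Or.inl ((scan_iff board).mp hscan)
    · rw [if_neg hscan]
      rw [diagB_iff board]
      constructor
      · exact fun h => Or.inr (Or.inr h)
      · rintro (h | h | h)
        · exact absurd ((scan_iff board).mpr (Or.inl h)) hscan
        · exact absurd ((scan_iff board).mpr (Or.inr h)) hscan
        · exact h

-- ===== VERDICT (by name: the statement is the Claim_ definition above) =====
theorem moveThePiece_spec : Claim_equal_moveThePiece := by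
  intro board _ hPre
  unfold Spec_moveThePiece
  rw [Bool.eq_iff_iff, A_iff board hPre, B_iff board]
  exact or_congr Iff.rfl (or_congr Iff.rfl (diag_symm_iff board))
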